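-- pv_equiv track=rewrite | github.com/incomparable/fb-labs-2020 | cp_2/bodnar_kazmidi_fb-82_cp2/lab2.py | split_with_key
-- ===== SOURCE A (Python) =====
-- def split_with_key(text, key_len):
--     result = list()
--
--     for i in range(key_len):
--         line = ''
--         for j in range(0, len(text), key_len):
--             if (i + j) < len(text):
--                 line = line + text[i + j]
--         result.append(line)
--     return result
-- ===== SOURCE B (Python) =====
-- def split_with_key(text, key_len):
--     return [text[i::key_len] for i in range(key_len)]
-- ===== Notes on version B (the rewrite author's own statement) =====
-- stated objective: idiomatic
-- what changed: The nested loops that build each row one character at a time are replaced by a single comprehension of strided slices text[i::key_len].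
import Mathlib
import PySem

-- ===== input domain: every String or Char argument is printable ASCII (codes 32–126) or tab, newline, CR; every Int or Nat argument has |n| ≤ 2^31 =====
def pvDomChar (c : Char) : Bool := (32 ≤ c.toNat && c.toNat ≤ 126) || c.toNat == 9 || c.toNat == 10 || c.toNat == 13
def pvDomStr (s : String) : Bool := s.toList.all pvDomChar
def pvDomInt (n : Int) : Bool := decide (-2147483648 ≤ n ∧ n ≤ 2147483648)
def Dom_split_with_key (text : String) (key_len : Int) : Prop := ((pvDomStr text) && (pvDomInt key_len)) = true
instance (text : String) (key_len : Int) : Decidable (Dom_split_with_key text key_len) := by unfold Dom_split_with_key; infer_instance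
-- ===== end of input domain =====

-- B replaces A's nested character-appending loops by one strided slice text[i::key_len] per row (idiomatic rewrite, same result).


-- ===== PORT A =====
-- text[i + j] is guarded by 'i + j < len(text)' and i, j ≥ 0, so pyGetD's default is never read.
def split_with_key (text : String) (key_len : Int) : List String :=
  (PySem.List.pyRange 0 key_len 1).foldl
    (fun result i =>
      let line := (PySem.List.pyRange 0 (PySem.Str.len text) key_len).foldl
        (fun line j =>
          if i + j < PySem.Str.len text then line ++ [PySem.List.pyGetD text.toList (i + j) ' ']
          else line)
        ([] : List Char)
      result ++ [String.ofList line])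
    []

-- ===== PORT B =====
-- inside the map, 0 ≤ i < key_len, so the step key_len is nonzero and slice? never returns none; getD "" totalizes.
def split_with_key_alt (text : String) (key_len : Int) : List String :=
  (PySem.List.pyRange 0 key_len 1).map
    (fun i => (PySem.Str.slice? text (some i) none key_len).getD "")

-- ===== PRECONDITION & SPEC =====
def Spec_split_with_key (text : String) (key_len : Int) (out : List String) : Prop := out = split_with_key_alt text key_len
instance (text : String) (key_len : Int) (out : List String) : Decidable (Spec_split_with_key text key_len out) := by unfold Spec_split_with_key; infer_instance

-- ===== CLAIM (what is proved, stated in full; the proofs are below) =====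
def Claim_equal_split_with_key : Prop := ∀ (text : String) (key_len : Int), Dom_split_with_key text key_len → Spec_split_with_key text key_len (split_with_key text key_len)

-- ===== LEMMAS AND PROOFS =====

-- a prefix-closed filter of a range is a shorter range
lemma filter_range_lt (a : Nat) (c : Int) :
    (List.range a).filter (fun (m : Nat) => decide ((m : Int) < c)) = List.range (min a c.toNat) := by
  induction a with
  | zero => simp
  | succ a ih =>
    rw [List.range_succ, List.filter_append, ih]
    by_cases h : (a : Int) < c
    · have : min (a + 1) c.toNat = min a c.toNat + 1 := by omega
      rw [this, List.range_succ]
      simp [h, Nat.min_eq_left (by omega : a ≤ c.toNat)]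
    · have : min (a + 1) c.toNat = min a c.toNat := by omega
      simp [this, h]

-- the strided slice text[i::k] (0 ≤ i, 0 < k) is exactly A's guarded inner loop
lemma row_eq (cs : List Char) (i k : Int) (hi : 0 ≤ i) (hk : 0 < k) :
    PySem.Chars.slice? cs (some i) none k =
      some ((((PySem.List.pyRange 0 (cs.length : Int) k).filter
          (fun j => decide (i + j < (cs.length : Int)))).map
          (fun j => PySem.List.pyGetD cs (i + j) ' '))) := by
  have hk0 : k ≠ 0 := ne_of_gt hk
  set n : Int := (cs.length : Int) with hn
  have hn0 : 0 ≤ n := by positivity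
  have key : ∀ m : Int, (i + k * m < n ↔ m < (n - i + k - 1) / k) := by
    intro m
    have h2 : m < (n - i + k - 1) / k ↔ (m + 1) * k ≤ n - i + k - 1 := by
      rw [Int.lt_iff_add_one_le, Int.le_ediv_iff_mul_le hk]
    rw [h2]
    constructor <;> intro h <;> nlinarith
  rw [PySem.List.pyRange_of_pos 0 n hk]
  simp only [PySem.Chars.slice?, PySem.List.slice?, PySem.List.sliceIndices, if_neg hk0,
    if_neg (by omega : ¬ k < 0), if_pos hk]
  simp only [if_neg (by omega : ¬ i < 0), ← hn]
  by_cases hin : i < n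
  · have hmin : min i n = i := min_eq_left (le_of_lt hin)
    rw [hmin, if_pos hin, if_pos (by omega : (0:Int) < n)]
    rw [List.filter_map]
    have hpred : ∀ m ∈ List.range ((n - 0 + k - 1) / k).toNat,
        ((fun j => decide (i + j < n)) ∘ (fun (m : Nat) => 0 + k * (m : Int))) m =
        (fun (m : Nat) => decide ((m : Int) < (n - i + k - 1) / k)) m := by
      intro m _
      simp only [Function.comp, zero_add, decide_eq_decide]
      exact key m
    rw [List.filter_congr hpred, filter_range_lt]
    have hle : ((n - i + k - 1) / k).toNat ≤ ((n - 0 + k - 1) / k).toNat := by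
      have := Int.ediv_le_ediv hk (by omega : n - i + k - 1 ≤ n - 0 + k - 1)
      omega
    rw [min_eq_right hle]
    congr 1
    have hfm : ∀ m ∈ List.range ((n - i + k - 1) / k).toNat,
        (cs[(i + k * (m : Int)).toNat]? : Option Char) =
        (some ∘ fun (m : Nat) => PySem.List.pyGetD cs (i + (0 + k * (m : Int))) ' ') m := by
      intro m hm
      have hmlt : (m : Int) < (n - i + k - 1) / k := by
        have := List.mem_range.mp hm; omega
      have hlt : i + k * (m : Int) < n := (key (m : Int)).mpr hmlt
      have hge : 0 ≤ i + k * (m : Int) := by positivity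
      have hnat : (i + k * (m : Int)).toNat < cs.length := by omega
      simp only [Function.comp, zero_add,
        PySem.List.pyGetD_of_nonneg cs ' ' hge,
        List.getElem?_eq_getElem hnat, List.getD_eq_getElem _ _ hnat]
    rw [List.filterMap_congr hfm, List.filterMap_eq_map]
    simp [List.map_map, Function.comp]
  · rw [min_eq_right (by omega : n ≤ i), if_neg (lt_irrefl n)]
    have : (List.range 0) = ([] : List Nat) := rfl
    rw [this]
    have hnil : (List.map (fun (m : Nat) => 0 + k * (m : Int))
        (List.range (if 0 < n then ((n - 0 + k - 1) / k).toNat else 0))).filter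
        (fun j => decide (i + j < n)) = [] := by
      rw [List.filter_eq_nil_iff]
      intro j hj
      simp only [List.mem_map] at hj
      obtain ⟨m, _, rfl⟩ := hj
      simp only [decide_eq_true_eq, not_lt]
      nlinarith [Int.natCast_nonneg m]
    rw [hnil]
    rfl

-- ===== VERDICT (by name: the statement is the Claim_ definition above) =====
theorem split_with_key_spec : Claim_equal_split_with_key := by
  intro text key_len _
  unfold Spec_split_with_key split_with_key split_with_key_alt
  rw [PySem.List.foldl_append_singleton_eq_map, List.nil_append]
  refine List.map_congr_left (fun i hi => ?_)
  obtain ⟨hi0, hik⟩ := (PySem.List.mem_pyRange_one (a := 0) (b := key_len)).mp hi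
  have hk : 0 < key_len := lt_of_le_of_lt hi0 hik
  have hfold : ((PySem.List.pyRange 0 (PySem.Str.len text) key_len).foldl
      (fun line j =>
        if i + j < PySem.Str.len text then line ++ [PySem.List.pyGetD text.toList (i + j) ' ']
        else line) ([] : List Char)) =
      ((PySem.List.pyRange 0 (PySem.Str.len text) key_len).filter
        (fun j => decide (i + j < PySem.Str.len text))).map
        (fun j => PySem.List.pyGetD text.toList (i + j) ' ') := by
    have hfun : (fun (line : List Char) j =>
        if i + j < PySem.Str.len text then line ++ [PySem.List.pyGetD text.toList (i + j) ' ']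
        else line) =
        (fun (line : List Char) j =>
          if (fun j => decide (i + j < PySem.Str.len text)) j = true then
            line ++ [(fun j => PySem.List.pyGetD text.toList (i + j) ' ') j]
          else line) := by
      funext line j
      simp only [decide_eq_true_eq]
    rw [hfun, PySem.List.foldl_append_if, List.nil_append]
  rw [hfold]
  rw [PySem.Str.slice?, show PySem.Str.len text = (text.toList.length : Int) from by
    simp [PySem.Str.len_eq]]
  rw [row_eq text.toList i key_len hi0 hk]
  rfl
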